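-- pv_equiv track=rewrite | github.com/sarwady-ankitha/ATM-simulation-c | atm_gui.py | extract_balance
-- ===== SOURCE A (Python) =====
-- def extract_balance(output):
--     lines = output.strip().splitlines()
--     for line in lines:
--         if "current balance" in line.lower():
--             return line
--     for line in reversed(lines):
--         if "balance" in line.lower():
--             return line
--     return lines[-1] if lines else "Balance not found"
-- ===== SOURCE B (Python) =====
-- def extract_balance(output):
--     lines = output.strip().splitlines()
--     first_current = None
--     last_balance = None
--     for line in lines:
--         low = line.lower()
--         if first_current is None and "current balance" in low:
--             first_current = line
--         if "balance" in low:
--             last_balance = line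
--     if first_current is not None:
--         return first_current
--     if last_balance is not None:
--         return last_balance
--     return lines[-1] if lines else "Balance not found"
-- ===== Notes on version B (the rewrite author's own statement) =====
-- stated objective: alternative
-- what changed: Replaces A's two sequential scans (forward for first 'current balance', then a reversed scan for last 'balance') by one forward pass that maintains first_current and last_balance accumulators and decides afterwards.
import Mathlib
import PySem

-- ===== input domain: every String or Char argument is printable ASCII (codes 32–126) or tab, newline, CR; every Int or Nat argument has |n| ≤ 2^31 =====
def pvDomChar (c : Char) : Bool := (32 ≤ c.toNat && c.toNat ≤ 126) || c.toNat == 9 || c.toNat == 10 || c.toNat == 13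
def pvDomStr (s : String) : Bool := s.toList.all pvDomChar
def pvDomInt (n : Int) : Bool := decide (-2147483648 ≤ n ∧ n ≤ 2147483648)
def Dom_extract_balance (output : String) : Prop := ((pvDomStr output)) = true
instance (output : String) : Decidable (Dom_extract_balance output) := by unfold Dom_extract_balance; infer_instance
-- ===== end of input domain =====

-- B merges A's two sequential scans into one forward pass with two accumulators (alternative decomposition, same cost).

-- ===== PORT A =====
-- first for-loop with early return = find? on the lines; second loop scans reversed(lines); lines[-1] on a nonempty list = getLast?
def extract_balance (output : String) : String :=
  let lines := PySem.Str.splitlines (PySem.Str.strip output)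
  match lines.find? (fun l => PySem.Str.isIn "current balance" (PySem.Str.lower l)) with
  | some l => l
  | none =>
    match lines.reverse.find? (fun l => PySem.Str.isIn "balance" (PySem.Str.lower l)) with
    | some l => l
    | none =>
      match lines.getLast? with
      | some l => l
      | none => "Balance not found"

-- ===== PORT B =====
-- one forward fold carrying (first_current, last_balance)
def extract_balance_alt (output : String) : String :=
  let lines := PySem.Str.splitlines (PySem.Str.strip output)
  let p := lines.foldl
    (fun (acc : Option String × Option String) line =>
      let low := PySem.Str.lower line
      (if acc.1.isNone && PySem.Str.isIn "current balance" low then some line else acc.1,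
       if PySem.Str.isIn "balance" low then some line else acc.2))
    (none, none)
  match p.1 with
  | some l => l
  | none =>
    match p.2 with
    | some l => l
    | none =>
      match lines.getLast? with
      | some l => l
      | none => "Balance not found"

-- ===== PRECONDITION & SPEC =====
def Spec_extract_balance (output : String) (out : String) : Prop := out = extract_balance_alt output
instance (output : String) (out : String) : Decidable (Spec_extract_balance output out) := by unfold Spec_extract_balance; infer_instance

-- ===== CLAIM (what is proved, stated in full; the proofs are below) =====
def Claim_equal_extract_balance : Prop := ∀ (output : String), Dom_extract_balance output → Spec_extract_balance output (extract_balance output)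

-- ===== LEMMAS AND PROOFS =====
theorem balance_foldl_eq (L : List String) (a b : Option String) :
    L.foldl
      (fun (acc : Option String × Option String) line =>
        let low := PySem.Str.lower line
        (if acc.1.isNone && PySem.Str.isIn "current balance" low then some line else acc.1,
         if PySem.Str.isIn "balance" low then some line else acc.2))
      (a, b)
    = (a.or (L.find? (fun l => PySem.Str.isIn "current balance" (PySem.Str.lower l))),
       (L.reverse.find? (fun l => PySem.Str.isIn "balance" (PySem.Str.lower l))).or b) := by
  induction L generalizing a b with
  | nil => simp
  | cons x L ih =>
    simp only [List.foldl_cons, ih, List.find?_cons, List.reverse_cons, List.find?_append,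
      Prod.mk.injEq]
    refine ⟨?_, ?_⟩
    · cases h : PySem.Str.isIn "current balance" (PySem.Str.lower x) <;> cases a <;>
        simp [*, Option.or]
    · cases h : PySem.Str.isIn "balance" (PySem.Str.lower x) <;>
        cases h2 : L.reverse.find? (fun l => PySem.Str.isIn "balance" (PySem.Str.lower l)) <;>
        simp [*, Option.or]

-- ===== VERDICT (by name: the statement is the Claim_ definition above) =====
theorem extract_balance_spec : Claim_equal_extract_balance := by
  intro output _
  unfold Spec_extract_balance extract_balance extract_balance_alt
  simp only [balance_foldl_eq]
  simp
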